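-- pv_equiv track=rewrite | github.com/GillesJ/sentivent-gts-economic-sentiment-triplets | code/BertModel/utils.py | get_aspects
-- ===== SOURCE A (Python) =====
-- def get_aspects(tags, length, ignore_index=-1):
--     spans = []
--     start = -1
--     for i in range(length):
--         if tags[i][i] == ignore_index: continue
--         elif tags[i][i] == 1:
--             if start == -1:
--                 start = i
--         elif tags[i][i] != 1:
--             if start != -1:
--                 spans.append([start, i - 1])
--                 start = -1
--     if start != -1:
--         spans.append([start, length-1])
--     return spans
-- ===== SOURCE B (Python) =====
-- def get_aspects(tags, length, ignore_index=-1):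
--     # Two-pass segment decomposition: break positions first, then one scan per segment.
--     breaks = [i for i in range(length)
--               if tags[i][i] != ignore_index and tags[i][i] != 1]
--     breaks.append(length)  # sentinel: the trailing segment ends at length-1
--     spans = []
--     prev = -1
--     for brk in breaks:
--         first_one = next((j for j in range(prev + 1, brk)
--                           if tags[j][j] != ignore_index and tags[j][j] == 1), None)
--         if first_one is not None:
--             spans.append([first_one, brk - 1])
--         prev = brk
--     return spans
-- ===== Notes on version B (the rewrite author's own statement) =====
-- stated objective: alternative
-- what changed: Replaces A's one-pass start/-1 state machine with a two-pass segment decomposition: first collect all break positions on the diagonal (value neither 1 nor ignore_index) plus a sentinel at length, then for each segment between consecutive breaks scan for the first 1 and emit [first_one, break-1].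
import Mathlib
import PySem

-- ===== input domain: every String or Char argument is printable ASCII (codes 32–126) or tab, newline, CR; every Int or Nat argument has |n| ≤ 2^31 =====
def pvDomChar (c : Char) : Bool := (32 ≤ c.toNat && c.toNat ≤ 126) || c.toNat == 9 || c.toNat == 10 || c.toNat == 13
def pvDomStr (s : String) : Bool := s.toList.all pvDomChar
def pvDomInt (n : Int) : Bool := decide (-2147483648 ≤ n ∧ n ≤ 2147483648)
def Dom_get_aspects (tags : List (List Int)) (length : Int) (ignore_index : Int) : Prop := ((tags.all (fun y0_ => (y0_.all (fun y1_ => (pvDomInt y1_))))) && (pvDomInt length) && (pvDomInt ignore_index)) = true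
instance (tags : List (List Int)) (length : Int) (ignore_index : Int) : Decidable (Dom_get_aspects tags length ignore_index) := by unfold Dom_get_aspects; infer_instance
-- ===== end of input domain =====

-- B replaces A's one-pass start-variable state machine by a two-pass decomposition
-- (break positions + sentinel, then one first-1 scan per segment); same cost, alternative structure.


-- shared accessor: the Python expression tags[i][i] (both programs read only this);
-- total via getD, exact on Pre_ (indices in range, nonnegative)
def pvDiag (tags : List (List Int)) (i : Int) : Int :=
  PySem.List.pyGetD (PySem.List.pyGetD tags i []) i 0

-- ===== PORT A =====
def get_aspects (tags : List (List Int)) (length : Int) (ignore_index : Int) : List (List Int) :=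
  let st := (PySem.List.pyRange 0 length 1).foldl
    (fun (st : List (List Int) × Int) i =>
      if pvDiag tags i = ignore_index then st
      else if pvDiag tags i = 1 then
        (st.1, if st.2 = -1 then i else st.2)
      else if pvDiag tags i ≠ 1 then
        (if st.2 ≠ -1 then (st.1 ++ [[st.2, i - 1]], -1) else st)
      else st) ([], -1)
  if st.2 ≠ -1 then st.1 ++ [[st.2, length - 1]] else st.1

-- ===== PORT B =====
def get_aspects_alt (tags : List (List Int)) (length : Int) (ignore_index : Int) : List (List Int) :=
  let breaks := ((PySem.List.pyRange 0 length 1).filter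
      (fun i => pvDiag tags i != ignore_index && pvDiag tags i != 1)) ++ [length]
  let st := breaks.foldl
    (fun (st : List (List Int) × Int) brk =>
      match (PySem.List.pyRange (st.2 + 1) brk 1).find?
          (fun j => pvDiag tags j != ignore_index && pvDiag tags j == 1) with
      | some j => (st.1 ++ [[j, brk - 1]], brk)
      | none => (st.1, brk)) ([], -1)
  st.1

-- ===== PRECONDITION & SPEC =====
-- A raises IndexError iff some i in range(length) has i ≥ len(tags) or i ≥ len(tags[i]); Pre_ excludes exactly those.
def Pre_get_aspects (tags : List (List Int)) (length : Int) (ignore_index : Int) : Prop :=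
  length ≤ (tags.length : Int) ∧ ∀ pr ∈ (tags.take length.toNat).zipIdx, pr.2 < pr.1.length
instance (tags : List (List Int)) (length : Int) (ignore_index : Int) : Decidable (Pre_get_aspects tags length ignore_index) := by unfold Pre_get_aspects; infer_instance
def pvWitness_get_aspects : List (List Int) × Int × Int := ([[1, 0, 0], [0, 1, 0], [0, 0, 2]], 3, -1)

def Spec_get_aspects (tags : List (List Int)) (length : Int) (ignore_index : Int) (out : List (List Int)) : Prop := out = get_aspects_alt tags length ignore_index
instance (tags : List (List Int)) (length : Int) (ignore_index : Int) (out : List (List Int)) : Decidable (Spec_get_aspects tags length ignore_index out) := by unfold Spec_get_aspects; infer_instance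

-- ===== CLAIM (what is proved, stated in full; the proofs are below) =====
def Claim_equal_get_aspects : Prop := ∀ (tags : List (List Int)) (length : Int) (ignore_index : Int), Dom_get_aspects tags length ignore_index → Pre_get_aspects tags length ignore_index → Spec_get_aspects tags length ignore_index (get_aspects tags length ignore_index)

-- ===== LEMMAS AND PROOFS =====

-- Generic versions of the two loop bodies, over an arbitrary diagonal function d.
def pvStepA (ig : Int) (d : Int → Int) (st : List (List Int) × Int) (i : Int) : List (List Int) × Int :=
  if d i = ig then st
  else if d i = 1 then (st.1, if st.2 = -1 then i else st.2)
  else if d i ≠ 1 then (if st.2 ≠ -1 then (st.1 ++ [[st.2, i - 1]], -1) else st)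
  else st

def pvIsBrk (ig : Int) (d : Int → Int) (i : Int) : Bool := d i != ig && d i != 1
def pvIsOne (ig : Int) (d : Int → Int) (i : Int) : Bool := d i != ig && d i == 1

def pvStepB (ig : Int) (d : Int → Int) (st : List (List Int) × Int) (brk : Int) : List (List Int) × Int :=
  match (PySem.List.pyRange (st.2 + 1) brk 1).find? (pvIsOne ig d) with
  | some j => (st.1 ++ [[j, brk - 1]], brk)
  | none => (st.1, brk)

def pvFO (ig : Int) (d : Int → Int) (p : Int) (b : Int) : Option Int :=
  (PySem.List.pyRange (p + 1) b 1).find? (pvIsOne ig d)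

def pvEnc (o : Option Int) : Int := o.getD (-1)

lemma pvFO_nonneg (ig : Int) (d : Int → Int) (p b : Int) (hp : -1 ≤ p) {j : Int}
    (h : pvFO ig d p b = some j) : 0 ≤ j := by
  have hm := List.find?_some h
  have hmem := List.mem_of_find?_eq_some h
  have := (PySem.List.mem_pyRange_one).1 hmem
  omega

lemma pvFO_succ (ig : Int) (d : Int → Int) (p : Int) (n : Int) (hp : p < n) :
    pvFO ig d p (n + 1) = ((pvFO ig d p n).or (if pvIsOne ig d n then some n else none)) := by
  unfold pvFO
  rw [PySem.List.pyRange_one_succ_right (by omega : p + 1 ≤ n), List.find?_append]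
  cases h : (PySem.List.pyRange (p + 1) n 1).find? (pvIsOne ig d) <;>
    simp [List.find?] <;> split <;> simp_all

-- The invariant: after processing indices [0, n), A's state equals B's produced spans
-- together with the encoded first-1 position of the current (open) segment.
lemma pv_inv (ig : Int) (d : Int → Int) (n : Nat) :
    ((PySem.List.pyRange 0 n 1).foldl (pvStepA ig d) ([], -1)).1
      = (((PySem.List.pyRange 0 n 1).filter (pvIsBrk ig d)).foldl (pvStepB ig d) ([], -1)).1 ∧
    ((PySem.List.pyRange 0 n 1).foldl (pvStepA ig d) ([], -1)).2
      = pvEnc (pvFO ig d (((PySem.List.pyRange 0 n 1).filter (pvIsBrk ig d)).foldl (pvStepB ig d) ([], -1)).2 n) ∧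
    -1 ≤ (((PySem.List.pyRange 0 n 1).filter (pvIsBrk ig d)).foldl (pvStepB ig d) ([], -1)).2 ∧
    (((PySem.List.pyRange 0 n 1).filter (pvIsBrk ig d)).foldl (pvStepB ig d) ([], -1)).2 < n := by
  induction n with
  | zero =>
    simp [PySem.List.pyRange_one_eq_nil, pvFO, pvEnc]
  | succ n ih =>
    have hcast : ((n + 1 : Nat) : Int) = (n : Int) + 1 := by push_cast; ring
    rw [hcast, PySem.List.pyRange_one_succ_right (by positivity : (0 : Int) ≤ n),
      List.filter_append, List.foldl_append, List.foldl_append]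
    set sa := (PySem.List.pyRange 0 (n : Int) 1).foldl (pvStepA ig d) ([], -1) with hsa
    set sb := ((PySem.List.pyRange 0 (n : Int) 1).filter (pvIsBrk ig d)).foldl (pvStepB ig d) ([], -1) with hsb
    obtain ⟨h1, h2, h3, h4⟩ := ih
    by_cases hig : d n = ig
    · -- ignore cell: nothing changes, and FO is unchanged since n is not a 1
      have hbrk : pvIsBrk ig d n = false := by simp [pvIsBrk, hig]
      have hone : pvIsOne ig d n = false := by simp [pvIsOne, hig]
      have hfo : pvFO ig d sb.2 ((n : Int) + 1) = pvFO ig d sb.2 n := by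
        rw [pvFO_succ ig d sb.2 n h4, hone]; simp
      simp only [List.foldl_cons, List.foldl_nil, List.filter_cons, List.filter_nil, hbrk,
        Bool.false_eq_true, if_false]
      unfold pvStepA
      rw [if_pos hig]
      exact ⟨h1, by rw [h2, hfo], h3, by omega⟩
    · by_cases h1' : d n = 1
      · -- a 1: B's state unchanged; FO gains n as a candidate iff it was empty so far
        have hig1 : (1 : Int) ≠ ig := h1' ▸ hig
        have hbrk : pvIsBrk ig d n = false := by simp [pvIsBrk, h1']
        have hone : pvIsOne ig d n = true := by simp [pvIsOne, h1']; omega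
        have hfo : pvFO ig d sb.2 ((n : Int) + 1) = (pvFO ig d sb.2 n).or (some n) := by
          rw [pvFO_succ ig d sb.2 n h4, hone]; simp
        simp only [List.foldl_cons, List.foldl_nil, List.filter_cons, List.filter_nil, hbrk,
          Bool.false_eq_true, if_false]
        unfold pvStepA
        rw [if_neg hig, if_pos h1']
        refine ⟨h1, ?_, h3, by omega⟩
        rcases hfo' : pvFO ig d sb.2 n with _ | j
        · have hsa2 : sa.2 = -1 := by rw [h2, hfo']; rfl
          simp [hsa2, hfo, hfo', pvEnc]
        · have hj0 : 0 ≤ j := pvFO_nonneg ig d sb.2 n h3 hfo'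
          have hsa2 : sa.2 = j := by rw [h2, hfo']; rfl
          rw [hfo, hfo']
          simp only [Option.or_some]
          rw [hsa2, if_neg (by omega : ¬ j = -1)]
          rfl
      · -- a break: A closes the open span (if any); B processes this break now
        have h1n : ¬ d n = 1 := h1'
        have hbrk : pvIsBrk ig d n = true := by simp [pvIsBrk]; omega
        have hfon : pvFO ig d (n : Int) ((n : Int) + 1) = none := by
          unfold pvFO
          rw [PySem.List.pyRange_one_eq_nil (by omega)]; rfl
        simp only [List.foldl_cons, List.foldl_nil, List.filter_cons, List.filter_nil, hbrk,
          if_true]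
        unfold pvStepA
        rw [if_neg hig, if_neg h1', if_pos h1n]
        rcases hfo' : pvFO ig d sb.2 n with _ | j
        · have hB : pvStepB ig d sb n = (sb.1, (n : Int)) := by
            unfold pvStepB
            rw [show (PySem.List.pyRange (sb.2 + 1) (n : Int) 1).find? (pvIsOne ig d)
                  = pvFO ig d sb.2 n from rfl, hfo']
          have hsa2 : sa.2 = -1 := by rw [h2, hfo']; rfl
          rw [hsa2, if_neg (by omega : ¬ (-1 : Int) ≠ -1), hB]
          exact ⟨h1, by rw [hfon, hsa2]; rfl, by omega, by omega⟩
        · have hB : pvStepB ig d sb n = (sb.1 ++ [[j, (n : Int) - 1]], (n : Int)) := by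
            unfold pvStepB
            rw [show (PySem.List.pyRange (sb.2 + 1) (n : Int) 1).find? (pvIsOne ig d)
                  = pvFO ig d sb.2 n from rfl, hfo']
          have hj0 : 0 ≤ j := pvFO_nonneg ig d sb.2 n h3 hfo'
          have hsa2 : sa.2 = j := by rw [h2, hfo']; rfl
          rw [hsa2, if_pos (by omega : j ≠ -1), hB]
          exact ⟨by rw [h1], by rw [hfon]; rfl, by omega, by omega⟩

-- A and B agree for every diagonal function and every length.
lemma pv_main (ig : Int) (d : Int → Int) (length : Int) :
    (let st := (PySem.List.pyRange 0 length 1).foldl (pvStepA ig d) ([], -1)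
     if st.2 ≠ -1 then st.1 ++ [[st.2, length - 1]] else st.1)
    = ((((PySem.List.pyRange 0 length 1).filter (pvIsBrk ig d)) ++ [length]).foldl
        (pvStepB ig d) ([], -1)).1 := by
  by_cases hl : length ≤ 0
  · rw [PySem.List.pyRange_one_eq_nil hl]
    simp [pvStepB]
    rw [PySem.List.pyRange_one_eq_nil (by omega)]
    simp
  · obtain ⟨n, hn⟩ : ∃ n : Nat, length = (n : Int) := ⟨length.toNat, by omega⟩
    subst hn
    rw [List.foldl_append, List.foldl_cons, List.foldl_nil]
    set sa := (PySem.List.pyRange 0 (n : Int) 1).foldl (pvStepA ig d) ([], -1) with hsa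
    set sb := ((PySem.List.pyRange 0 (n : Int) 1).filter (pvIsBrk ig d)).foldl (pvStepB ig d) ([], -1) with hsb
    obtain ⟨h1, h2, h3, h4⟩ := pv_inv ig d n
    show (if sa.2 ≠ -1 then sa.1 ++ [[sa.2, (n : Int) - 1]] else sa.1) = (pvStepB ig d sb n).1
    rcases hfo : pvFO ig d sb.2 n with _ | j
    · have hB : pvStepB ig d sb n = (sb.1, (n : Int)) := by
        unfold pvStepB
        rw [show (PySem.List.pyRange (sb.2 + 1) (n : Int) 1).find? (pvIsOne ig d)
              = pvFO ig d sb.2 n from rfl, hfo]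
      have hsa2 : sa.2 = -1 := by rw [h2, hfo]; rfl
      rw [hsa2, if_neg (by omega : ¬ (-1 : Int) ≠ -1), hB]
      exact h1
    · have hB : pvStepB ig d sb n = (sb.1 ++ [[j, (n : Int) - 1]], (n : Int)) := by
        unfold pvStepB
        rw [show (PySem.List.pyRange (sb.2 + 1) (n : Int) 1).find? (pvIsOne ig d)
              = pvFO ig d sb.2 n from rfl, hfo]
      have hj0 : 0 ≤ j := pvFO_nonneg ig d sb.2 n h3 hfo
      have hsa2 : sa.2 = j := by rw [h2, hfo]; rfl
      rw [hsa2, if_pos (by omega : j ≠ -1), hB, h1]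

-- ===== VERDICT (by name: the statement is the Claim_ definition above) =====
theorem get_aspects_spec : Claim_equal_get_aspects := by
  intro tags length ignore_index _ _
  unfold Spec_get_aspects get_aspects get_aspects_alt
  exact pv_main ignore_index (pvDiag tags) length
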